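-- pv_equiv track=rewrite | github.com/roxyursu/IndivdualProject | linear_script.py | segregation_level
-- ===== SOURCE A (Python) =====
-- def segregation_level(size) :
--    s = ""
--    for i in range(1, size) :
--       s += "SPEC\n"
--       s += "\tEF AG ( "
--       for j in range (1, size-1) :
--          s += "persons.separation_table["+ str(j) +"] + "
--       s += "persons.separation_table["+ str(size-1) +"] = "+ str(i)+ " ); \n\n"
--    return s
-- ===== SOURCE B (Python) =====
-- def segregation_level(size):
--     inner = " + ".join("persons.separation_table[" + str(j) + "]" for j in range(1, size))
--     return "".join("SPEC\n\tEF AG ( " + inner + " = " + str(i) + " ); \n\n" for i in range(1, size))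
-- ===== Notes on version B (the rewrite author's own statement) =====
-- stated objective: simpler
-- what changed: The constant inner sum expression is precomputed once with str.join instead of being rebuilt by a nested loop on every outer iteration, and the result is one join over the outer range instead of repeated string accumulation.
import Mathlib
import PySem

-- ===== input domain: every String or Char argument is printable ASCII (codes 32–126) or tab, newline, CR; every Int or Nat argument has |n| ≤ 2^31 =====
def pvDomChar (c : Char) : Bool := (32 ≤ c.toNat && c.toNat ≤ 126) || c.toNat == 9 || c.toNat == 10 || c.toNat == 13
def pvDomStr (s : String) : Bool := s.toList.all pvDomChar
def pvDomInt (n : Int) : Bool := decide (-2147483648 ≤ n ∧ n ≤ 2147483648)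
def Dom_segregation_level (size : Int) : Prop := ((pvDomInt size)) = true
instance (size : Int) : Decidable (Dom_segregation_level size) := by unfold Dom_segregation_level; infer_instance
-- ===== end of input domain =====

-- B precomputes the constant inner sum expression once with str.join and emits the result
-- with a single join over the outer range, instead of A's nested rebuild; objective: simpler.

-- ===== PORT A =====
def segregation_level (size : Int) : String :=
  (PySem.List.pyRange 1 size).foldl (fun s i =>
    let s := s ++ "SPEC\n"
    let s := s ++ "\tEF AG ( "
    let s := (PySem.List.pyRange 1 (size - 1)).foldl
      (fun s j => s ++ ("persons.separation_table[" ++ PySem.Int.toStr j ++ "] + ")) s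
    s ++ ("persons.separation_table[" ++ PySem.Int.toStr (size - 1) ++ "] = "
          ++ PySem.Int.toStr i ++ " ); \n\n")) ""

-- ===== PORT B =====
def segregation_level_alt (size : Int) : String :=
  let inner := PySem.Str.join " + " ((PySem.List.pyRange 1 size).map
    (fun j => "persons.separation_table[" ++ PySem.Int.toStr j ++ "]"))
  PySem.Str.join "" ((PySem.List.pyRange 1 size).map
    (fun i => "SPEC\n\tEF AG ( " ++ inner ++ " = " ++ PySem.Int.toStr i ++ " ); \n\n"))

-- ===== PRECONDITION & SPEC =====
def Spec_segregation_level (size : Int) (out : String) : Prop := out = segregation_level_alt size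
instance (size : Int) (out : String) : Decidable (Spec_segregation_level size out) := by unfold Spec_segregation_level; infer_instance

-- ===== CLAIM (what is proved, stated in full; the proofs are below) =====
def Claim_equal_segregation_level : Prop := ∀ (size : Int), Dom_segregation_level size → Spec_segregation_level size (segregation_level size)

-- ===== LEMMAS AND PROOFS =====

-- A string-append fold equals the initial string followed by the pieces, at the char level.
theorem pv_foldl_append_toList {α : Type} (f : α → String) :
    ∀ (l : List α) (s : String),
      (l.foldl (fun acc x => acc ++ f x) s).toList
        = s.toList ++ (l.map (fun x => (f x).toList)).flatten := by
  intro l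
  induction l with
  | nil => intro s; simp
  | cons a t ih => intro s; simp [ih]

-- joining with the empty separator is flattening
theorem pv_join_empty :
    ∀ (l : List (List Char)), PySem.Chars.join [] l = l.flatten := by
  intro l
  induction l with
  | nil => exact PySem.Chars.join_nil []
  | cons a t ih =>
      cases t with
      | nil => simp [PySem.Chars.join_singleton]
      | cons b r => rw [PySem.Chars.join_cons_cons, ih]; simp

-- join sep over (parts ++ [last]) = the "piece ++ sep" flattening followed by last
theorem pv_join_append_last (sep : List Char) :
    ∀ (l : List (List Char)) (x : List Char),
      PySem.Chars.join sep (l ++ [x])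
        = (l.map (fun p => p ++ sep)).flatten ++ x := by
  intro l
  induction l with
  | nil => intro x; simp [PySem.Chars.join_singleton]
  | cons a t ih =>
      intro x
      cases h : t ++ [x] with
      | nil => simp at h
      | cons b r =>
          rw [List.cons_append, h, PySem.Chars.join_cons_cons, ← h, ih]
          simp

-- A's loop body appends one fixed block per outer iteration.
theorem pv_A_fold (size : Int) :
    ∀ (l : List Int) (s : String),
      (l.foldl (fun s i =>
        let s := s ++ "SPEC\n"
        let s := s ++ "\tEF AG ( "
        let s := (PySem.List.pyRange 1 (size - 1)).foldl
          (fun s j => s ++ ("persons.separation_table[" ++ PySem.Int.toStr j ++ "] + ")) s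
        s ++ ("persons.separation_table[" ++ PySem.Int.toStr (size - 1) ++ "] = "
              ++ PySem.Int.toStr i ++ " ); \n\n")) s).toList
      = s.toList ++ (l.map (fun i =>
          "SPEC\n".toList ++ "\tEF AG ( ".toList
          ++ ((PySem.List.pyRange 1 (size - 1)).map (fun j =>
                ("persons.separation_table[" ++ PySem.Int.toStr j ++ "] + ").toList)).flatten
          ++ ("persons.separation_table[" ++ PySem.Int.toStr (size - 1) ++ "] = "
              ++ PySem.Int.toStr i ++ " ); \n\n").toList)).flatten := by
  intro l
  induction l with
  | nil => intro s; simp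
  | cons a t ih =>
      intro s
      rw [List.foldl_cons, ih]
      simp only
      rw [String.toList_append, pv_foldl_append_toList]
      simp

set_option maxHeartbeats 1000000 in
theorem segregation_level_eq (size : Int) :
    segregation_level size = segregation_level_alt size := by
  by_cases h : size ≤ 1
  · rw [segregation_level, segregation_level_alt, PySem.List.pyRange_one_eq_nil h]
    simp [PySem.Str.join, PySem.Chars.join_nil]
  · have h1 : (1 : Int) ≤ size - 1 := by omega
    have hsplit : PySem.List.pyRange 1 size
        = PySem.List.pyRange 1 (size - 1) ++ [size - 1] := by
      have e : size - 1 + 1 = size := by omega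
      have := PySem.List.pyRange_one_succ_right (a := 1) (b := size - 1) h1
      rwa [e] at this
    apply String.toList_injective
    rw [segregation_level, segregation_level_alt]
    simp only
    rw [pv_A_fold, PySem.Str.toList_join, List.map_map]
    conv_rhs => rw [show "".toList = ([] : List Char) from rfl, pv_join_empty]
    simp only [String.toList_empty, List.nil_append, Function.comp_def]
    refine congrArg List.flatten (List.map_congr_left fun i _ => ?_)
    -- the per-iteration blocks coincide
    simp only [String.toList_append, PySem.Str.toList_join, List.map_map, Function.comp_def]
    conv_rhs => rw [hsplit]
    rw [List.map_append]
    simp only [List.map_cons, List.map_nil]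
    rw [pv_join_append_last]
    simp only [List.map_map, Function.comp_def]
    simp [List.append_assoc]

-- ===== VERDICT (by name: the statement is the Claim_ definition above) =====
theorem segregation_level_spec : Claim_equal_segregation_level := by
  intro size _
  unfold Spec_segregation_level
  exact segregation_level_eq size
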